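-- pv_equiv track=rewrite | github.com/TNodeCode/label-anything | GDINO.py | match_label
-- ===== SOURCE A (Python) =====
-- from typing import List
--
-- def match_label(detected_label: str, user_labels: List[str]) -> int:
--     dl = detected_label.strip().lower()
--     # try exact match first
--     for idx, ul in enumerate(user_labels):
--         if dl == ul.strip().lower():
--             return idx
--     # try substring matches
--     for idx, ul in enumerate(user_labels):
--         uln = ul.strip().lower()
--         if uln in dl or dl in uln:
--             return idx
--     # fallback: return 0
--     return 0
-- ===== SOURCE B (Python) =====
-- def match_label(detected_label, user_labels):
--     dl = detected_label.strip().lower()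
--     sub_idx = None
--     for idx, ul in enumerate(user_labels):
--         uln = ul.strip().lower()
--         if dl == uln:
--             return idx  # exact match wins immediately
--         if sub_idx is None and (uln in dl or dl in uln):
--             sub_idx = idx  # remember first substring candidate
--     return sub_idx if sub_idx is not None else 0
-- ===== Notes on version B (the rewrite author's own statement) =====
-- stated objective: simpler
-- what changed: Replaces A's two full passes over user_labels (exact pass, then substring pass) with a single pass keeping the first substring candidate in an accumulator; each label is normalized once instead of twice.
import Mathlib
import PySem

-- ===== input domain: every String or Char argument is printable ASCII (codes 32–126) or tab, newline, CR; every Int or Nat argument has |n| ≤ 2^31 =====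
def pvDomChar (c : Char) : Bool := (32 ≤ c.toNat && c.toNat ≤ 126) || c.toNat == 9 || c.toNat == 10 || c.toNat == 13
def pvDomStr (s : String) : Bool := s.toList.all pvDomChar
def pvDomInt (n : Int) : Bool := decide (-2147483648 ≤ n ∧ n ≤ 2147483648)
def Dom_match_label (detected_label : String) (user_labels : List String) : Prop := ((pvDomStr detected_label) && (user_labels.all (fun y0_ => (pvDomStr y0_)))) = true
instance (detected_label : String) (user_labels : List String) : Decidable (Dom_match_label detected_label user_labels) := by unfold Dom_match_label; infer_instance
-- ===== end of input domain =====

-- ===== PORT A =====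
-- B differs from A by a single pass with a remembered substring candidate instead of two passes (objective: simpler).

-- first index (from idx) whose normalized label equals dl (A's first loop)
def pvFindExact (dl : String) : List String → Int → Option Int
  | [], _ => none
  | ul :: t, idx =>
    if dl = PySem.Str.lower (PySem.Str.strip ul) then some idx
    else pvFindExact dl t (idx + 1)

-- first index (from idx) with a bidirectional substring match (A's second loop)
def pvFindSub (dl : String) : List String → Int → Option Int
  | [], _ => none
  | ul :: t, idx =>
    let uln := PySem.Str.lower (PySem.Str.strip ul)
    if PySem.Str.isIn uln dl || PySem.Str.isIn dl uln then some idx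
    else pvFindSub dl t (idx + 1)

def match_label (detected_label : String) (user_labels : List String) : Int :=
  let dl := PySem.Str.lower (PySem.Str.strip detected_label)
  match pvFindExact dl user_labels 0 with
  | some i => i
  | none =>
    match pvFindSub dl user_labels 0 with
    | some i => i
    | none => 0

-- ===== PORT B =====
-- single pass: return on exact match, remember the first substring candidate in sub_idx
def pvLoopB (dl : String) : List String → Int → Option Int → Int
  | [], _, sub_idx => match sub_idx with | some j => j | none => 0
  | ul :: t, idx, sub_idx =>
    let uln := PySem.Str.lower (PySem.Str.strip ul)
    if dl = uln then idx
    else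
      pvLoopB dl t (idx + 1)
        (if sub_idx = none ∧ (PySem.Str.isIn uln dl || PySem.Str.isIn dl uln) then some idx
         else sub_idx)

def match_label_alt (detected_label : String) (user_labels : List String) : Int :=
  let dl := PySem.Str.lower (PySem.Str.strip detected_label)
  pvLoopB dl user_labels 0 none

-- ===== PRECONDITION & SPEC =====
def Spec_match_label (detected_label : String) (user_labels : List String) (out : Int) : Prop := out = match_label_alt detected_label user_labels
instance (detected_label : String) (user_labels : List String) (out : Int) : Decidable (Spec_match_label detected_label user_labels out) := by unfold Spec_match_label; infer_instance

-- ===== CLAIM (what is proved, stated in full; the proofs are below) =====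
def Claim_equal_match_label : Prop := ∀ (detected_label : String) (user_labels : List String), Dom_match_label detected_label user_labels → Spec_match_label detected_label user_labels (match_label detected_label user_labels)

-- ===== LEMMAS AND PROOFS =====

-- loop invariant: B's single pass equals A's exact pass, then the remembered candidate, then A's substring pass
theorem pvLoopB_eq (dl : String) (uls : List String) :
    ∀ (idx : Int) (sub_idx : Option Int),
      pvLoopB dl uls idx sub_idx =
        match pvFindExact dl uls idx with
        | some i => i
        | none =>
          match sub_idx with
          | some j => j
          | none => match pvFindSub dl uls idx with | some i => i | none => 0 := by
  induction uls with
  | nil => intro idx sub_idx; cases sub_idx <;> rfl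
  | cons ul t ih =>
    intro idx sub_idx
    by_cases hex : dl = PySem.Str.lower (PySem.Str.strip ul)
    · simp [pvLoopB, pvFindExact, hex]
    · cases sub_idx with
      | some j => simp [pvLoopB, pvFindExact, hex, ih]
      | none =>
        by_cases hs : (PySem.Chars.isIn (PySem.Chars.lower (PySem.Chars.strip ul.toList)) dl.toList = true
            ∨ PySem.Chars.isIn dl.toList (PySem.Chars.lower (PySem.Chars.strip ul.toList)) = true)
        · simp [pvLoopB, pvFindExact, pvFindSub, hex, hs, ih]
        · simp [pvLoopB, pvFindExact, pvFindSub, hex, hs, ih]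

-- ===== VERDICT (by name: the statement is the Claim_ definition above) =====
theorem match_label_spec : Claim_equal_match_label := by
  intro detected_label user_labels _
  unfold Spec_match_label match_label match_label_alt
  rw [pvLoopB_eq]
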